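-- pv_equiv track=rewrite | github.com/yynet2022/junkbox | glob/my_glob.py | _make_case_insensitive
-- ===== SOURCE A (Python) =====
-- def _make_case_insensitive(pattern: str) -> str:
--     """
--     globパターン内のアルファベットを [aA] 形式に変換し、
--     Case SensitiveなFSでも大文字小文字を無視してマッチするようにする。
--     """
--     ret = []
--     i = 0
--     n = len(pattern)
--     while i < n:
--         c = pattern[i]
--         if c == '[':
--             # 文字クラスの開始
--             j = i + 1
--             if j < n and pattern[j] == '!':
--                 j += 1
--             if j < n and pattern[j] == ']': # []...] のケース
--                 j += 1
--             while j < n and pattern[j] != ']':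
--                 j += 1
--
--             if j < n:
--                 # カッコ内の文字を取得
--                 content = pattern[i+1:j]
--                 # 小文字版と大文字版を結合（a-z -> a-zA-Z となる）
--                 # 重複は実害ないが、isalphaなものだけ追加
--                 lower_content = content.lower()
--                 upper_content = content.upper()
--
--                 if lower_content == upper_content:
--                     new_content = content
--                 else:
--                     # 単純に結合する。a-z は a-zA-Z になる。
--                     # !a-z のような否定は先頭の ! を維持する必要がある。
--                     if content.startswith('!'):
--                         new_content = '!' + content[1:].lower() + content[1:].upper()
--                     else:
--                         new_content = content.lower() + content.upper()
--
--                 ret.append(f'[{new_content}]')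
--                 i = j + 1
--             else:
--                 ret.append('[')
--                 i += 1
--         elif c in '*?':
--             ret.append(c)
--             i += 1
--         elif c.isalpha():
--             ret.append(f'[{c.lower()}{c.upper()}]')
--             i += 1
--         else:
--             ret.append(c)
--             i += 1
--     return "".join(ret)
-- ===== SOURCE B (Python) =====
-- def _make_case_insensitive(pattern: str) -> str:
--     """Segment-wise rewrite: instead of walking the pattern one character at a
--     time, repeatedly cut the remaining text at the next '[' with str.partition,
--     case-fold the whole literal run in one batch, then resolve the bracket
--     class (again with partition for its closing ']')."""
--     out = []
--     remaining = pattern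
--     while True:
--         literal, bracket, rest = remaining.partition('[')
--         out.append(''.join(
--             '[%s%s]' % (ch.lower(), ch.upper()) if ch.isalpha() else ch
--             for ch in literal))
--         if not bracket:
--             return ''.join(out)
--         split = _split_class(rest)
--         if split is None:
--             out.append('[')
--             remaining = rest
--         else:
--             content, tail = split
--             out.append('[%s]' % _fold_class(content))
--             remaining = tail
--
--
-- def _split_class(rest):
--     # rest = text following a '['; (class content, text after ']') or None
--     skip = 0
--     if rest[:1] == '!':
--         skip += 1
--     if rest[skip:skip + 1] == ']':
--         skip += 1
--     inner, closed, tail = rest[skip:].partition(']')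
--     if not closed:
--         return None
--     return rest[:skip] + inner, tail
--
--
-- def _fold_class(content):
--     if not any(ch.isalpha() for ch in content):
--         return content
--     if content.startswith('!'):
--         return '!' + content[1:].lower() + content[1:].upper()
--     return content.lower() + content.upper()
-- ===== Notes on version B (the rewrite author's own statement) =====
-- stated objective: alternative
-- what changed: Replaces A's one-character-at-a-time index-advancing state machine (manual i/j pointers, per-char emit, lower()==upper() class test) by a segment-wise loop: str.partition repeatedly cuts the remaining text at the next opening bracket, the whole literal run is case-folded in one batch, the class body is located with a second partition on the closing bracket, and case-sensitive classes are detected via any(ch.isalpha()) instead of comparing the lower/upper foldings.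
import Mathlib
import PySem

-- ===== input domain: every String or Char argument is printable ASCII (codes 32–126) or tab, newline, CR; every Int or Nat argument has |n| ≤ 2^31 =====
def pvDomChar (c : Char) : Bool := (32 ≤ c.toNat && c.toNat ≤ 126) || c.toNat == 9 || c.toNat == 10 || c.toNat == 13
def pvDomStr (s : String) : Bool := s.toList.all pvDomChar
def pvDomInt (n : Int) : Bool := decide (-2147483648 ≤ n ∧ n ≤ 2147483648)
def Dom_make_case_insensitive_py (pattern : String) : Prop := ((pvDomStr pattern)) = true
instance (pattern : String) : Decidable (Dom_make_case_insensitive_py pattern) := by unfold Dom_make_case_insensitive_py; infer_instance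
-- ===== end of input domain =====

-- B replaces A's one-character-at-a-time index machine by a segment-wise loop:
-- str.partition cuts the remaining text at the next opening bracket, the whole
-- literal run is case-folded in one batch, and the class is resolved with a
-- second partition; objective: alternative decomposition, same O(n) cost.

-- ===== PORT A =====
-- inner `while j < n and pattern[j] != ']': j += 1` of A
def pvScanJ (l : List Char) (j : Nat) : Nat :=
  if h : j < l.length then
    if l.getD j ' ' ≠ ']' then pvScanJ l (j + 1) else j
  else j
termination_by l.length - j

-- the `while i < n` loop of A; `fuel` only makes the recursion structural
-- (each step advances i by ≥ 1, so fuel = n suffices); pattern[i] is in range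
-- whenever read, so `getD` is exact.
def pvALoop (l : List Char) (fuel pos : Nat) (acc : List Char) : List Char :=
  match fuel with
  | 0 => acc
  | fuel + 1 =>
    if pos < l.length then
      let c := l.getD pos ' '
      if c = '[' then
        let j0 := pos + 1
        let j1 := if j0 < l.length ∧ l.getD j0 ' ' = '!' then j0 + 1 else j0
        let j2 := if j1 < l.length ∧ l.getD j1 ' ' = ']' then j1 + 1 else j1
        let j := pvScanJ l j2
        if j < l.length then
          let content := PySem.List.slice l (some ((pos : Int) + 1)) (some (j : Int))
          let lo := PySem.Chars.lower content
          let up := PySem.Chars.upper content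
          let nc :=
            if lo = up then content
            else if PySem.Chars.startswith content ['!'] then
              '!' :: (PySem.Chars.lower (PySem.List.slice content (some 1) none) ++
                      PySem.Chars.upper (PySem.List.slice content (some 1) none))
            else lo ++ up
          pvALoop l fuel (j + 1) (acc ++ '[' :: nc ++ [']'])
        else pvALoop l fuel (pos + 1) (acc ++ ['['])
      else if c = '*' ∨ c = '?' then pvALoop l fuel (pos + 1) (acc ++ [c])
      else if PySem.Chars.isalpha c then
        pvALoop l fuel (pos + 1) (acc ++ ['[', PySem.Chars.lowerChar c, PySem.Chars.upperChar c, ']'])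
      else pvALoop l fuel (pos + 1) (acc ++ [c])
    else acc

def make_case_insensitive_py (pattern : String) : String :=
  String.ofList (pvALoop pattern.toList pattern.toList.length 0 [])

-- ===== PORT B =====
-- hand port of Python's built-in str.partition(sep) (sep here is always one
-- character, never empty): split around the FIRST occurrence of sep, or
-- (s, '', '') when sep does not occur — exact via PySem.Chars.find.
def pvPartition (s : List Char) (sep : List Char) : List Char × List Char × List Char :=
  let f := PySem.Chars.find s sep
  if f < 0 then (s, [], [])
  else (s.take f.toNat, sep, s.drop (f.toNat + sep.length))

-- the per-character expression of Source B's batch genexp: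
-- '[%s%s]' % (ch.lower(), ch.upper()) if ch.isalpha() else ch
def pvFoldChar (c : Char) : List Char :=
  if PySem.Chars.isalpha c then ['[', PySem.Chars.lowerChar c, PySem.Chars.upperChar c, ']'] else [c]

-- _split_class of Source B (rest[:1], rest[skip:skip+1], rest[:skip], rest[skip:] are slices)
def pvSplitClass (rest : List Char) : Option (List Char × List Char) :=
  let skip0 : Nat := 0
  let skip1 := if PySem.List.slice rest (some ((skip0 : Int))) (some ((skip0 : Int) + 1)) = ['!'] then skip0 + 1 else skip0
  let skip := if PySem.List.slice rest (some ((skip1 : Int))) (some ((skip1 : Int) + 1)) = [']'] then skip1 + 1 else skip1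
  let p := pvPartition (PySem.List.slice rest (some (skip : Int)) none) [']']
  if p.2.1 = [] then none
  else some (PySem.List.slice rest none (some (skip : Int)) ++ p.1, p.2.2)

-- _fold_class of Source B
def pvFoldClass (content : List Char) : List Char :=
  if content.any PySem.Chars.isalpha = false then content
  else if PySem.Chars.startswith content ['!'] then
    '!' :: (PySem.Chars.lower (PySem.List.slice content (some 1) none) ++
            PySem.Chars.upper (PySem.List.slice content (some 1) none))
  else PySem.Chars.lower content ++ PySem.Chars.upper content

-- the `while True` loop of Source B; each iteration consumes at least one character
-- of `remaining`, so fuel = len + 1 suffices (fuel only makes it structural)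
def pvBLoop (remaining : List Char) (fuel : Nat) (acc : List (List Char)) : List Char :=
  match fuel with
  | 0 => PySem.Chars.join [] acc
  | fuel + 1 =>
    let p := pvPartition remaining ['[']
    let acc := acc ++ [PySem.Chars.join [] (p.1.map pvFoldChar)]
    if p.2.1 = [] then PySem.Chars.join [] acc
    else
      match pvSplitClass p.2.2 with
      | none => pvBLoop p.2.2 fuel (acc ++ [['[']])
      | some (content, tail) => pvBLoop tail fuel (acc ++ ['[' :: pvFoldClass content ++ [']']])

def make_case_insensitive_py_alt (pattern : String) : String :=
  String.ofList (pvBLoop pattern.toList (pattern.toList.length + 1) [])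

-- ===== PRECONDITION & SPEC =====
def Spec_make_case_insensitive_py (pattern : String) (out : String) : Prop := out = make_case_insensitive_py_alt pattern
instance (pattern : String) (out : String) : Decidable (Spec_make_case_insensitive_py pattern out) := by unfold Spec_make_case_insensitive_py; infer_instance

-- ===== CLAIM (what is proved, stated in full; the proofs are below) =====
def Claim_equal_make_case_insensitive_py : Prop := ∀ (pattern : String), Dom_make_case_insensitive_py pattern → Spec_make_case_insensitive_py pattern (make_case_insensitive_py pattern)

-- ===== LEMMAS AND PROOFS =====
-- proof-layer common form: both ports are shown equal to the flattening of a
-- token stream (pvTokens) mapped through a per-token transform (pvTransform).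
def pvClassEnd (l : List Char) (pos : Nat) : Option Nat :=
  if l.getD pos ' ' ≠ '[' then none
  else
    let k0 := pos + 1
    let k1 := if PySem.List.slice l (some (k0 : Int)) (some ((k0 : Int) + 1)) = ['!'] then k0 + 1 else k0
    let k2 := if PySem.List.slice l (some (k1 : Int)) (some ((k1 : Int) + 1)) = [']'] then k1 + 1 else k1
    let close := PySem.Chars.findFrom l [']'] (k2 : Int) none
    if close < 0 then none else some (close.toNat + 1)

def pvTokens (l : List Char) (fuel pos : Nat) : List (List Char) :=
  match fuel with
  | 0 => []
  | fuel + 1 =>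
    if pos < l.length then
      match pvClassEnd l pos with
      | none => [l.getD pos ' '] :: pvTokens l fuel (pos + 1)
      | some e => PySem.List.slice l (some (pos : Int)) (some (e : Int)) :: pvTokens l fuel e
    else []

def pvTransform (tok : List Char) : List Char :=
  if PySem.List.pyGetD tok 0 ' ' = '[' ∧ 1 < tok.length then
    let body := PySem.List.slice tok (some 1) (some (-1))
    if PySem.Chars.lower body = PySem.Chars.upper body then tok
    else if PySem.Chars.startswith body ['!'] then
      '[' :: '!' :: (PySem.Chars.lower (PySem.List.slice body (some 1) none) ++
                     PySem.Chars.upper (PySem.List.slice body (some 1) none)) ++ [']']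
    else '[' :: (PySem.Chars.lower body ++ PySem.Chars.upper body) ++ [']']
  else if PySem.Chars.strIsalpha tok then
    '[' :: (PySem.Chars.lower tok ++ PySem.Chars.upper tok) ++ [']']
  else tok

theorem pv_singleton_prefix {c : Char} {xs : List Char} : [c] <+: xs ↔ xs.head? = some c := by
  cases xs with
  | nil => simp
  | cons a t => simp [List.cons_prefix_cons, eq_comm]

theorem pv_find_char (c : Char) (cs : List Char) :
    PySem.Chars.find cs [c] =
      if List.findIdx (· = c) cs < cs.length then (List.findIdx (· = c) cs : Int) else -1 := by
  by_cases hm : c ∈ cs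
  · have hlt : List.findIdx (· = c) cs < cs.length :=
      List.findIdx_lt_length.mpr ⟨c, hm, by simp⟩
    have hnn : 0 ≤ PySem.Chars.find cs [c] := by
      rw [PySem.Chars.find_nonneg_iff]
      rcases List.mem_iff_getElem?.mp hm with ⟨i, hi⟩
      rw [← PySem.Chars.isIn_iff_infix, ← PySem.Chars.exists_prefix_drop_iff_isIn]
      exact ⟨i, pv_singleton_prefix.mpr (by rw [List.head?_drop, hi])⟩
    obtain ⟨hpre, hmin⟩ := PySem.Chars.find_spec hnn
    set F := (PySem.Chars.find cs [c]).toNat with hF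
    have h1 : cs[F]? = some c := by rw [← List.head?_drop]; exact pv_singleton_prefix.mp hpre
    have hFlt : F < cs.length := (List.getElem?_eq_some_iff.mp h1).1
    have hFv : cs[F] = c := by
      have h2 := List.getElem?_eq_getElem hFlt
      rw [h2] at h1; exact Option.some.inj h1
    have hle1 : List.findIdx (· = c) cs ≤ F := by
      by_contra hcon
      push_neg at hcon
      have hx := List.not_of_lt_findIdx (p := (· = c)) (i := F) hcon
      have hx2 : ¬ cs[F] = c := by simpa using hx
      exact hx2 hFv
    have hle2 : F ≤ List.findIdx (· = c) cs := by
      by_contra hcon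
      push_neg at hcon
      refine hmin _ hcon (pv_singleton_prefix.mpr ?_)
      rw [List.head?_drop, List.getElem?_eq_getElem hlt]
      simpa using List.findIdx_getElem (w := hlt)
    have hEq : F = List.findIdx (· = c) cs := le_antisymm hle2 hle1
    rw [if_pos hlt, ← hEq, hF]
    omega
  · have hni : ¬ ([c] <:+: cs) := by
      intro h
      rcases (PySem.Chars.exists_prefix_drop_iff_isIn [c] cs).mpr
        ((PySem.Chars.isIn_iff_infix [c] cs).mpr h) with ⟨j, hj⟩
      have hx := pv_singleton_prefix.mp hj
      rw [List.head?_drop] at hx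
      exact hm (List.mem_of_getElem? hx)
    have hf : PySem.Chars.find cs [c] = -1 := (PySem.Chars.find_eq_neg_one_iff cs [c]).mpr hni
    have hFl : List.findIdx (· = c) cs = cs.length :=
      List.findIdx_eq_length.mpr (fun x hx => by
        simp only [decide_eq_false_iff_not]
        intro h; exact hm (h ▸ hx))
    rw [hf, if_neg (by omega)]

theorem pvScanJ_eq (l : List Char) (k : Nat) :
    pvScanJ l k = k + List.findIdx (· = ']') (l.drop k) := by
  unfold pvScanJ
  split
  · rename_i h
    have hg : l.getD k ' ' = l[k] := by
      rw [List.getD_eq_getElem?_getD, List.getElem?_eq_getElem h]; rfl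
    rw [List.drop_eq_getElem_cons h, List.findIdx_cons]
    split
    · rename_i hne
      rw [hg] at hne
      have hd : (decide (l[k] = ']')) = false := by simpa using hne
      rw [hd, pvScanJ_eq l (k + 1)]
      simp only [cond_false]
      omega
    · rename_i hne
      rw [hg] at hne
      push_neg at hne
      simp [hne]
  · rename_i h
    rw [List.drop_eq_nil_of_le (by omega)]
    simp [List.findIdx_nil]
termination_by l.length - k

theorem pv_join_nil_flatten (xss : List (List Char)) : PySem.Chars.join [] xss = xss.flatten := by
  induction xss with
  | nil => simp [PySem.Chars.join_nil]
  | cons x xs ih =>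
    cases xs with
    | nil => simp [PySem.Chars.join_singleton]
    | cons y r => rw [PySem.Chars.join_cons_cons, ih]; simp

theorem pv_slice_one (l : List Char) (k : Nat) (c : Char) :
    (PySem.List.slice l (some (k : Int)) (some ((k : Int) + 1)) = [c]) ↔
      (k < l.length ∧ l.getD k ' ' = c) := by
  have h1 : ((k : Int) + 1) = ((k + 1 : Nat) : Int) := by push_cast; ring
  rw [h1, PySem.List.slice_natCast]
  have h2 : k + 1 - k = 1 := by omega
  rw [h2]
  by_cases h : k < l.length
  · have hg : l.getD k ' ' = l[k] := by
      rw [List.getD_eq_getElem?_getD, List.getElem?_eq_getElem h]; rfl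
    have ht : List.take 1 (List.drop k l) = [l[k]] := by
      rw [List.drop_eq_getElem_cons h]; rfl
    rw [ht, hg]
    simp [h, eq_comm]
  · rw [List.drop_eq_nil_of_le (by omega)]
    simp [h]

theorem pv_body_slice (content : List Char) :
    PySem.List.slice ('[' :: content ++ [']']) (some 1) (some (-1)) = content := by
  simp [PySem.List.slice, PySem.List.clampIdx]
  rw [if_neg (by omega)]
  rw [show content.length + 1 - 1 = content.length from by omega, List.take_left]

theorem pv_transform_class (content : List Char) :
    pvTransform ('[' :: content ++ [']']) =
      '[' :: (if PySem.Chars.lower content = PySem.Chars.upper content then content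
              else if PySem.Chars.startswith content ['!'] then
                '!' :: (PySem.Chars.lower (PySem.List.slice content (some 1) none) ++
                        PySem.Chars.upper (PySem.List.slice content (some 1) none))
              else PySem.Chars.lower content ++ PySem.Chars.upper content) ++ [']'] := by
  unfold pvTransform
  have hget : PySem.List.pyGetD ('[' :: (content ++ [']'])) 0 ' ' = '[' :=
    PySem.List.pyGetD_zero_cons _ _ _
  have hlen : 1 < ('[' :: content ++ [']']).length := by
    simp [List.length_append]
  rw [if_pos ⟨hget, hlen⟩, pv_body_slice]
  split_ifs <;> simp_all

theorem pv_transform_single (c : Char) :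
    pvTransform [c] =
      if c = '*' ∨ c = '?' then [c]
      else if PySem.Chars.isalpha c then ['[', PySem.Chars.lowerChar c, PySem.Chars.upperChar c, ']']
      else [c] := by
  unfold pvTransform
  rw [if_neg (by simp)]
  have hsa : PySem.Chars.strIsalpha [c] = PySem.Chars.isalpha c := by
    simp [PySem.Chars.strIsalpha]
  rw [hsa]
  by_cases hst : c = '*' ∨ c = '?'
  · have hna : PySem.Chars.isalpha c = false := by
      rcases hst with h | h <;> subst h <;> decide
    rw [hna, if_pos hst]
    simp
  · rw [if_neg hst]
    by_cases ha : PySem.Chars.isalpha c = true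
    · rw [if_pos ha, if_pos ha]
      simp [PySem.Chars.lower, PySem.Chars.upper]
    · rw [if_neg ha, if_neg ha]

theorem pv_segment (l : List Char) (pos j : Nat) (hp : pos < l.length) (hj : j < l.length)
    (hpj : pos < j) (hcp : l[pos] = '[') (hcj : l[j] = ']') :
    PySem.List.slice l (some (pos : Int)) (some ((j + 1 : Nat) : Int)) =
      '[' :: PySem.List.slice l (some ((pos : Int) + 1)) (some (j : Int)) ++ [']'] := by
  have hcast : ((pos : Int) + 1) = ((pos + 1 : Nat) : Int) := by push_cast; ring
  rw [hcast, PySem.List.slice_natCast, PySem.List.slice_natCast]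
  have e1 : j + 1 - pos = (j - (pos + 1) + 1) + 1 := by omega
  have e2 : pos + 1 + (j - (pos + 1)) = j := by omega
  rw [e1, List.drop_eq_getElem_cons hp, List.take_succ_cons, hcp, List.take_add_one,
    List.getElem?_drop, e2, List.getElem?_eq_getElem hj, hcj]
  simp

def pvJ1 (l : List Char) (pos : Nat) : Nat :=
  if pos + 1 < l.length ∧ l.getD (pos + 1) ' ' = '!' then pos + 1 + 1 else pos + 1

def pvJ2 (l : List Char) (pos : Nat) : Nat :=
  if pvJ1 l pos < l.length ∧ l.getD (pvJ1 l pos) ' ' = ']' then pvJ1 l pos + 1 else pvJ1 l pos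

theorem pvJ2_ge (l : List Char) (pos : Nat) : pos + 1 ≤ pvJ2 l pos := by
  unfold pvJ2 pvJ1; split_ifs <;> omega

theorem pvJ2_le (l : List Char) (pos : Nat) (h : pos < l.length) : pvJ2 l pos ≤ l.length := by
  unfold pvJ2 pvJ1
  split_ifs <;> omega

theorem pv_classEnd_eq (l : List Char) (pos : Nat) (hp : pos < l.length)
    (hc : l.getD pos ' ' = '[') :
    pvClassEnd l pos =
      if pvScanJ l (pvJ2 l pos) < l.length then some (pvScanJ l (pvJ2 l pos) + 1) else none := by
  unfold pvClassEnd
  rw [if_neg (fun h => h hc)]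
  simp only []
  rw [if_congr (pv_slice_one l (pos + 1) '!') rfl rfl]
  rw [show (if pos + 1 < l.length ∧ l.getD (pos + 1) ' ' = '!' then pos + 1 + 1 else pos + 1) = pvJ1 l pos from rfl]
  rw [if_congr (pv_slice_one l (pvJ1 l pos) ']') rfl rfl]
  rw [show (if pvJ1 l pos < l.length ∧ l.getD (pvJ1 l pos) ' ' = ']' then pvJ1 l pos + 1 else pvJ1 l pos) = pvJ2 l pos from rfl]
  rw [PySem.Chars.findFrom_natCast l [']'] (pvJ2 l pos) (pvJ2_le l pos hp)]
  rw [pv_find_char, pvScanJ_eq]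
  set F := List.findIdx (· = ']') (List.drop (pvJ2 l pos) l) with hF
  have hFle : F ≤ (List.drop (pvJ2 l pos) l).length := List.findIdx_le_length
  rw [List.length_drop] at hFle
  have hd : (List.drop (pvJ2 l pos) l).length = l.length - pvJ2 l pos := List.length_drop
  have h2le := pvJ2_le l pos hp
  by_cases hFlt : F < (List.drop (pvJ2 l pos) l).length
  · rw [if_pos hFlt]
    rw [hd] at hFlt
    have hne : ((F : Int) ≠ -1) := by omega
    rw [if_neg (by omega)]
    rw [if_neg (by omega)]
    rw [if_pos (by omega)]
    simp only [Option.some.injEq]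
    omega
  · rw [if_neg hFlt]
    rw [hd] at hFlt
    rw [if_pos rfl, if_pos (by omega)]
    split_ifs with hx
    · exfalso; omega
    · rfl

theorem pv_main (l : List Char) :
    ∀ fuel pos acc, l.length - pos ≤ fuel →
      pvALoop l fuel pos acc = acc ++ ((pvTokens l fuel pos).map pvTransform).flatten := by
  intro fuel
  induction fuel with
  | zero => intro pos acc h; simp [pvALoop, pvTokens]
  | succ fuel ih =>
    intro pos acc hfuel
    by_cases hp : pos < l.length
    · by_cases hc : l.getD pos ' ' = '['
      · -- bracket case
        have hCE := pv_classEnd_eq l pos hp hc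
        have hscan : pvJ2 l pos ≤ pvScanJ l (pvJ2 l pos) := by
          rw [pvScanJ_eq]; omega
        have hge := pvJ2_ge l pos
        simp only [pvALoop, pvTokens]
        rw [if_pos hp, if_pos hp, if_pos hc, hCE]
        rw [show (if pos + 1 < l.length ∧ l.getD (pos + 1) ' ' = '!' then pos + 1 + 1 else pos + 1) = pvJ1 l pos from rfl]
        rw [show (if pvJ1 l pos < l.length ∧ l.getD (pvJ1 l pos) ' ' = ']' then pvJ1 l pos + 1 else pvJ1 l pos) = pvJ2 l pos from rfl]
        set j := pvScanJ l (pvJ2 l pos) with hj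
        by_cases hcl : j < l.length
        · rw [if_pos hcl, if_pos hcl]
          simp only [List.map_cons, List.flatten_cons]
          have hcp : l[pos] = '[' := by
            rw [List.getD_eq_getElem?_getD, List.getElem?_eq_getElem hp] at hc
            exact hc
          have hcj : l[j] = ']' := by
            rw [pvScanJ_eq] at hj
            have hFlt : List.findIdx (· = ']') (List.drop (pvJ2 l pos) l) < (List.drop (pvJ2 l pos) l).length := by
              rw [List.length_drop]; omega
            have := List.findIdx_getElem (w := hFlt)
            rw [List.getElem_drop] at this
            simp only [decide_eq_true_eq] at this
            simp only [hj]
            exact this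
          have hseg := pv_segment l pos j hp hcl (by omega) hcp hcj
          rw [hseg, pv_transform_class]
          rw [ih (j + 1) _ (by omega)]
          simp [List.append_assoc]
        · rw [if_neg hcl, if_neg hcl]
          rw [ih (pos + 1) _ (by omega)]
          simp only [List.map_cons, List.flatten_cons]
          have : l.getD pos ' ' = '[' := hc
          rw [this, pv_transform_single]
          rw [if_neg (by decide), if_neg (by decide)]
          simp [List.append_assoc]
      · -- non-bracket
        have hCE : pvClassEnd l pos = none := by
          unfold pvClassEnd
          rw [if_pos hc]
        simp only [pvALoop, pvTokens]
        rw [if_pos hp, if_pos hp, if_neg hc, hCE]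
        simp only [List.map_cons, List.flatten_cons]
        rw [pv_transform_single]
        by_cases hst : l.getD pos ' ' = '*' ∨ l.getD pos ' ' = '?'
        · rw [if_pos hst, if_pos hst, ih (pos + 1) _ (by omega)]
          simp [List.append_assoc]
        · rw [if_neg hst, if_neg hst]
          by_cases ha : PySem.Chars.isalpha (l.getD pos ' ') = true
          · rw [if_pos ha, if_pos ha, ih (pos + 1) _ (by omega)]
            simp [List.append_assoc]
          · rw [if_neg ha, if_neg ha, ih (pos + 1) _ (by omega)]
            simp [List.append_assoc]
    · simp [pvALoop, pvTokens, hp]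

-- ---- B side: character-level case facts ----
theorem pv_lu_char (c : Char) :
    (PySem.Chars.lowerChar c = PySem.Chars.upperChar c) ↔ PySem.Chars.isalpha c = false := by
  unfold PySem.Chars.lowerChar PySem.Chars.upperChar PySem.Chars.isalpha
      PySem.Chars.isupper PySem.Chars.islower
  have hle : ∀ a b : Char, (a ≤ b) ↔ a.toNat ≤ b.toNat := fun a b => by
    rw [Char.le_def]
    exact UInt32.le_iff_toNat_le
  have hA : 'A'.toNat = 65 := rfl
  have hZ : 'Z'.toNat = 90 := rfl
  have ha : 'a'.toNat = 97 := rfl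
  have hz : 'z'.toNat = 122 := rfl
  by_cases hu : 65 ≤ c.toNat ∧ c.toNat ≤ 90
  · have hdu : (decide ('A' ≤ c) && decide (c ≤ 'Z')) = true := by
      simp only [Bool.and_eq_true, decide_eq_true_eq, hle, hA, hZ, ha, hz]
      omega
    have hdl : (decide ('a' ≤ c) && decide (c ≤ 'z')) = false := by
      simp only [Bool.and_eq_false_iff, decide_eq_false_iff_not, hle, hA, hZ, ha, hz]
      omega
    rw [hdu, hdl, if_pos rfl, if_neg (by simp), Bool.true_or]
    constructor
    · intro h
      exfalso
      have hv : (c.toNat + 32).isValidChar := Or.inl (by omega)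
      have := congrArg Char.toNat h
      rw [Char.toNat_ofNat, if_pos hv] at this
      omega
    · intro h; exact absurd h (by simp)
  · by_cases hlo : 97 ≤ c.toNat ∧ c.toNat ≤ 122
    · have hdu : (decide ('A' ≤ c) && decide (c ≤ 'Z')) = false := by
        simp only [Bool.and_eq_false_iff, decide_eq_false_iff_not, hle, hA, hZ, ha, hz]
        omega
      have hdl : (decide ('a' ≤ c) && decide (c ≤ 'z')) = true := by
        simp only [Bool.and_eq_true, decide_eq_true_eq, hle, hA, hZ, ha, hz]
        omega
      rw [hdu, hdl, if_neg (by simp), if_pos rfl, Bool.or_true]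
      constructor
      · intro h
        exfalso
        have hv : (c.toNat - 32).isValidChar := Or.inl (by omega)
        have := congrArg Char.toNat h
        rw [Char.toNat_ofNat, if_pos hv] at this
        omega
      · intro h; exact absurd h (by simp)
    · have hdu : (decide ('A' ≤ c) && decide (c ≤ 'Z')) = false := by
        simp only [Bool.and_eq_false_iff, decide_eq_false_iff_not, hle, hA, hZ, ha, hz]
        omega
      have hdl : (decide ('a' ≤ c) && decide (c ≤ 'z')) = false := by
        simp only [Bool.and_eq_false_iff, decide_eq_false_iff_not, hle, hA, hZ, ha, hz]
        omega
      rw [hdu, hdl, if_neg (by simp), if_neg (by simp)]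
      simp

theorem pv_lower_eq_upper_iff (content : List Char) :
    (PySem.Chars.lower content = PySem.Chars.upper content) ↔
      content.any PySem.Chars.isalpha = false := by
  unfold PySem.Chars.lower PySem.Chars.upper
  rw [List.map_inj_left, List.any_eq_false]
  constructor
  · intro h c hc
    simpa using (pv_lu_char c).mp (h c hc)
  · intro h c hc
    exact (pv_lu_char c).mpr (by simpa using h c hc)

theorem pv_transform_eq_foldChar (c : Char) : pvTransform [c] = pvFoldChar c := by
  rw [pv_transform_single]
  unfold pvFoldChar
  by_cases hst : c = '*' ∨ c = '?'
  · rcases hst with h | h <;> subst h <;> decide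
  · rw [if_neg hst]

theorem pv_foldClass_eq (content : List Char) :
    pvFoldClass content =
      (if PySem.Chars.lower content = PySem.Chars.upper content then content
       else if PySem.Chars.startswith content ['!'] then
         '!' :: (PySem.Chars.lower (PySem.List.slice content (some 1) none) ++
                 PySem.Chars.upper (PySem.List.slice content (some 1) none))
       else PySem.Chars.lower content ++ PySem.Chars.upper content) := by
  unfold pvFoldClass
  rw [if_congr (Iff.symm (pv_lower_eq_upper_iff content)) rfl rfl]

-- ---- B side: token-stream facts ----
theorem pv_classEnd_some (l : List Char) (pos e : Nat) (h : pvClassEnd l pos = some e) :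
    pos + 2 ≤ e ∧ e ≤ l.length ∧ l.getD pos ' ' = '[' := by
  have hc : l.getD pos ' ' = '[' := by
    by_contra hne
    unfold pvClassEnd at h
    rw [if_pos hne] at h
    exact absurd h (by simp)
  have hp : pos < l.length := by
    by_contra hge
    have : l.getD pos ' ' = ' ' := by
      rw [List.getD_eq_getElem?_getD, List.getElem?_eq_none (by omega)]
      rfl
    rw [this] at hc
    exact absurd hc (by decide)
  rw [pv_classEnd_eq l pos hp hc] at h
  have hscan : pvJ2 l pos ≤ pvScanJ l (pvJ2 l pos) := by
    rw [pvScanJ_eq]; omega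
  have hge := pvJ2_ge l pos
  by_cases hcl : pvScanJ l (pvJ2 l pos) < l.length
  · rw [if_pos hcl] at h
    have he : e = pvScanJ l (pvJ2 l pos) + 1 := (Option.some.inj h).symm
    exact ⟨by omega, by omega, hc⟩
  · rw [if_neg hcl] at h
    exact absurd h (by simp)

theorem pv_tokens_none_step (l : List Char) (f pos : Nat) (hp : pos < l.length)
    (h : pvClassEnd l pos = none) :
    pvTokens l (f + 1) pos = [l.getD pos ' '] :: pvTokens l f (pos + 1) := by
  simp only [pvTokens]
  rw [if_pos hp, h]

theorem pv_tokens_some_step (l : List Char) (f pos e : Nat) (hp : pos < l.length)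
    (h : pvClassEnd l pos = some e) :
    pvTokens l (f + 1) pos =
      PySem.List.slice l (some (pos : Int)) (some (e : Int)) :: pvTokens l f e := by
  simp only [pvTokens]
  rw [if_pos hp, h]

theorem pv_tokens_fuel (l : List Char) :
    ∀ f1 f2 pos, l.length - pos ≤ f1 → l.length - pos ≤ f2 →
      pvTokens l f1 pos = pvTokens l f2 pos := by
  intro f1
  induction f1 with
  | zero =>
    intro f2 pos h1 h2
    have hp : ¬ pos < l.length := by omega
    cases f2 <;> simp [pvTokens, hp]
  | succ f1 ih =>
    intro f2 pos h1 h2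
    by_cases hp : pos < l.length
    · have hf2 : ∃ g, f2 = g + 1 := ⟨f2 - 1, by omega⟩
      obtain ⟨g, rfl⟩ := hf2
      cases hCE : pvClassEnd l pos with
      | none =>
        rw [pv_tokens_none_step l f1 pos hp hCE, pv_tokens_none_step l g pos hp hCE,
          ih g (pos + 1) (by omega) (by omega)]
      | some e =>
        obtain ⟨he1, he2, _⟩ := pv_classEnd_some l pos e hCE
        rw [pv_tokens_some_step l f1 pos e hp hCE, pv_tokens_some_step l g pos e hp hCE,
          ih g e (by omega) (by omega)]
    · cases f2 <;> simp [pvTokens, hp]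

theorem pv_tokens_nil (l : List Char) (f pos : Nat) (h : ¬ pos < l.length) :
    pvTokens l f pos = [] := by
  cases f <;> simp [pvTokens, h]

theorem pv_getD_drop (l : List Char) (n i : Nat) :
    (l.drop n).getD i ' ' = l.getD (n + i) ' ' := by
  simp [List.getD_eq_getElem?_getD, List.getElem?_drop]

theorem pv_tokens_singles (l : List Char) :
    ∀ k pos, pos + k ≤ l.length → (∀ i, i < k → l.getD (pos + i) ' ' ≠ '[') →
      pvTokens l l.length pos =
        ((l.drop pos).take k).map (fun c => [c]) ++ pvTokens l l.length (pos + k) := by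
  intro k
  induction k with
  | zero => intro pos _ _; simp
  | succ k ih =>
    intro pos hk hno
    have hp : pos < l.length := by omega
    have hc : l.getD pos ' ' ≠ '[' := by
      have := hno 0 (by omega)
      simpa using this
    have hCE : pvClassEnd l pos = none := by
      unfold pvClassEnd
      rw [if_pos hc]
    have hm : ∃ m, l.length - pos = m + 1 := ⟨l.length - pos - 1, by omega⟩
    obtain ⟨m, hm⟩ := hm
    rw [pv_tokens_fuel l l.length (m + 1) pos (by omega) (by omega),
      pv_tokens_none_step l m pos hp hCE,
      pv_tokens_fuel l m l.length (pos + 1) (by omega) (by omega)]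
    rw [ih (pos + 1) (by omega) (fun i hi => by
      have := hno (i + 1) (by omega)
      rw [show pos + 1 + i = pos + (i + 1) from by omega]
      exact this)]
    rw [List.drop_eq_getElem_cons hp, List.take_succ_cons, List.map_cons]
    have hg : l.getD pos ' ' = l[pos] := by
      rw [List.getD_eq_getElem?_getD, List.getElem?_eq_getElem hp]; rfl
    rw [hg, show pos + 1 + k = pos + (k + 1) from by omega]
    simp

theorem pv_partition_eq (cs : List Char) (c : Char) :
    pvPartition cs [c] =
      if List.findIdx (· = c) cs < cs.length
      then (cs.take (List.findIdx (· = c) cs), [c], cs.drop (List.findIdx (· = c) cs + 1))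
      else (cs, [], []) := by
  unfold pvPartition
  rw [pv_find_char]
  by_cases h : List.findIdx (· = c) cs < cs.length
  · rw [if_pos h, if_pos h, if_neg (by omega)]
    simp [List.length_singleton]
  · rw [if_neg h, if_neg h, if_pos (by norm_num)]

theorem pv_splitClass_eq (l : List Char) (pos : Nat) (hp : pos < l.length) :
    pvSplitClass (l.drop (pos + 1)) =
      if pvScanJ l (pvJ2 l pos) < l.length
      then some (PySem.List.slice l (some ((pos : Int) + 1)) (some ((pvScanJ l (pvJ2 l pos) : Nat) : Int)),
                 l.drop (pvScanJ l (pvJ2 l pos) + 1))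
      else none := by
  unfold pvSplitClass
  simp only []
  rw [if_congr (pv_slice_one (l.drop (pos + 1)) 0 '!') rfl rfl]
  rw [pv_getD_drop, List.length_drop]
  rw [show (if 0 < l.length - (pos + 1) ∧ l.getD (pos + 1 + 0) ' ' = '!' then 0 + 1 else 0)
        = pvJ1 l pos - (pos + 1) from by
    unfold pvJ1
    split_ifs with h1 h2 h2 <;> first | omega | (exfalso; omega) |
      (exfalso; exact h2 ⟨by omega, by simpa using h1.2⟩) |
      (exfalso; exact h1 ⟨by omega, by simpa using h2.2⟩)]
  set s1 := pvJ1 l pos - (pos + 1) with hs1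
  have hJ1ge : pos + 1 ≤ pvJ1 l pos := by unfold pvJ1; split_ifs <;> omega
  have hJ1le : pvJ1 l pos ≤ l.length := by
    unfold pvJ1; split_ifs with h <;> omega
  rw [if_congr (pv_slice_one (l.drop (pos + 1)) s1 ']') rfl rfl]
  rw [pv_getD_drop, List.length_drop]
  rw [show pos + 1 + s1 = pvJ1 l pos from by omega]
  rw [show (if s1 < l.length - (pos + 1) ∧ l.getD (pvJ1 l pos) ' ' = ']' then s1 + 1 else s1)
        = pvJ2 l pos - (pos + 1) from by
    unfold pvJ2
    split_ifs with h1 h2 h2 <;> first | omega | (exfalso; exact h2 ⟨by omega, h1.2⟩) |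
      (exfalso; exact h1 ⟨by omega, h2.2⟩)]
  set S := pvJ2 l pos - (pos + 1) with hS
  have hJ2ge := pvJ2_ge l pos
  have hJ2le := pvJ2_le l pos hp
  rw [PySem.List.slice_from_natCast]
  have hdd : List.drop S (List.drop (pos + 1) l) = List.drop (pvJ2 l pos) l := by
    rw [List.drop_drop]; congr 1; omega
  rw [hdd, pv_partition_eq, pvScanJ_eq]
  set K := List.findIdx (· = ']') (l.drop (pvJ2 l pos)) with hK
  rw [List.length_drop]
  by_cases hKlt : K < l.length - pvJ2 l pos
  · rw [if_pos hKlt]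
    simp only []
    rw [if_neg (by simp)]
    rw [if_pos (by omega)]
    rw [PySem.List.slice_to_natCast]
    rw [show ((pos : Int) + 1) = ((pos + 1 : Nat) : Int) from by push_cast; ring]
    rw [PySem.List.slice_natCast]
    have hdd2 : List.drop (K + 1) (List.drop (pvJ2 l pos) l) = List.drop (pvJ2 l pos + K + 1) l := by
      rw [List.drop_drop]; congr 1; try omega
    rw [hdd2]
    have htake : List.take S (l.drop (pos + 1)) ++ List.take K (l.drop (pvJ2 l pos))
        = List.take (pvJ2 l pos + K - (pos + 1)) (l.drop (pos + 1)) := by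
      rw [show pvJ2 l pos + K - (pos + 1) = S + K from by omega, List.take_add, hdd]
    rw [htake]
  · rw [if_neg hKlt]
    have hc2 : ¬ (pvJ2 l pos + K < l.length) := by omega
    rw [if_neg hc2]
    simp

theorem pv_mainB (l : List Char) :
    ∀ fuel pos acc, pos ≤ l.length → l.length - pos < fuel →
      pvBLoop (l.drop pos) fuel acc =
        PySem.Chars.join [] acc ++ ((pvTokens l l.length pos).map pvTransform).flatten := by
  intro fuel
  induction fuel with
  | zero => intro pos acc _ h; omega
  | succ fuel ih =>
    intro pos acc hple hfuel
    simp only [pvBLoop]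
    rw [pv_partition_eq]
    set K := List.findIdx (· = '[') (l.drop pos) with hK
    rw [List.length_drop]
    by_cases hKlt : K < l.length - pos
    · rw [if_pos hKlt]
      simp only []
      rw [if_neg (by simp)]
      have hpos : pos < l.length := by omega
      have hB : l.getD (pos + K) ' ' = '[' := by
        have hKd : K < (l.drop pos).length := by rw [List.length_drop]; omega
        have := List.findIdx_getElem (w := hKd)
        rw [List.getElem_drop] at this
        simp only [decide_eq_true_eq] at this
        rw [List.getD_eq_getElem?_getD, List.getElem?_eq_getElem (by omega : pos + K < l.length)]
        simpa using this
      have hno : ∀ i, i < K → l.getD (pos + i) ' ' ≠ '[' := by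
        intro i hi hcon
        have hlt : pos + i < l.length := by omega
        have hgv : l[pos + i] = '[' := by
          rw [List.getD_eq_getElem?_getD, List.getElem?_eq_getElem hlt] at hcon
          exact hcon
        have hid : i < (l.drop pos).length := by rw [List.length_drop]; omega
        have hx := List.not_of_lt_findIdx (p := (· = '[')) (i := i) (show i < K from hi)
        have hx2 : ¬ (l.drop pos)[i] = '[' := by simpa using hx
        apply hx2
        rw [List.getElem_drop]
        exact hgv
      have hsing := pv_tokens_singles l K pos (by omega) hno
      have hdropd : List.drop (K + 1) (List.drop pos l) = List.drop (pos + K + 1) l := by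
        rw [List.drop_drop]; congr 1; try omega
      rw [hdropd]
      have hscan : pvJ2 l (pos + K) ≤ pvScanJ l (pvJ2 l (pos + K)) := by
        rw [pvScanJ_eq]; omega
      have hge := pvJ2_ge l (pos + K)
      have hCE := pv_classEnd_eq l (pos + K) (by omega) hB
      have hSC := pv_splitClass_eq l (pos + K) (by omega)
      have hm : ∃ m, l.length - (pos + K) = m + 1 := ⟨l.length - (pos + K) - 1, by omega⟩
      obtain ⟨m, hm⟩ := hm
      have htokB : pvTokens l l.length (pos + K) = pvTokens l (m + 1) (pos + K) :=
        pv_tokens_fuel l l.length (m + 1) (pos + K) (by omega) (by omega)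
      set j := pvScanJ l (pvJ2 l (pos + K)) with hj
      by_cases hcl : j < l.length
      · rw [if_pos hcl] at hCE hSC
        rw [hSC]
        simp only []
        have hcj : l[j] = ']' := by
          rw [pvScanJ_eq] at hj
          have hFlt : List.findIdx (· = ']') (List.drop (pvJ2 l (pos + K)) l) <
              (List.drop (pvJ2 l (pos + K)) l).length := by
            rw [List.length_drop]; omega
          have := List.findIdx_getElem (w := hFlt)
          rw [List.getElem_drop] at this
          simp only [decide_eq_true_eq] at this
          simp only [hj]
          exact this
        have hcp : l[pos + K] = '[' := by
          rw [List.getD_eq_getElem?_getD, List.getElem?_eq_getElem (by omega : pos + K < l.length)] at hB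
          exact hB
        have hseg := pv_segment l (pos + K) j (by omega) hcl (by omega) hcp hcj
        rw [ih (j + 1) _ (by omega) (by omega)]
        rw [hsing, htokB, pv_tokens_some_step l m (pos + K) (j + 1) (by omega) hCE,
          pv_tokens_fuel l m l.length (j + 1) (by omega) (by omega), hseg]
        simp only [List.map_append, List.map_cons, List.flatten_append, List.flatten_cons]
        rw [pv_transform_class, pv_foldClass_eq]
        simp only [pv_join_nil_flatten, List.map_map, List.flatten_append, List.flatten_cons,
          List.flatten_nil, List.append_nil, List.append_assoc]
        rw [show (pvTransform ∘ fun c => [c]) = pvFoldChar from funext fun c => pv_transform_eq_foldChar c]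
      · rw [if_neg hcl] at hCE hSC
        rw [hSC]
        simp only []
        rw [ih (pos + K + 1) _ (by omega) (by omega)]
        rw [hsing, htokB, pv_tokens_none_step l m (pos + K) (by omega) hCE,
          pv_tokens_fuel l m l.length (pos + K + 1) (by omega) (by omega), hB]
        simp only [List.map_append, List.map_cons, List.flatten_append, List.flatten_cons]
        rw [pv_transform_single, if_neg (by decide), if_neg (by decide)]
        simp only [pv_join_nil_flatten, List.map_map, List.flatten_append, List.flatten_cons,
          List.flatten_nil, List.append_nil, List.append_assoc]
        rw [show (pvTransform ∘ fun c => [c]) = pvFoldChar from funext fun c => pv_transform_eq_foldChar c]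
    · rw [if_neg hKlt]
      simp only []
      rw [if_pos (by simp)]
      have hno : ∀ i, i < l.length - pos → l.getD (pos + i) ' ' ≠ '[' := by
        intro i hi hcon
        have hlt : pos + i < l.length := by omega
        have hgv : l[pos + i] = '[' := by
          rw [List.getD_eq_getElem?_getD, List.getElem?_eq_getElem hlt] at hcon
          exact hcon
        have hid : i < (l.drop pos).length := by rw [List.length_drop]; omega
        have hiK : i < K := by omega
        have hx := List.not_of_lt_findIdx (p := (· = '[')) (i := i) hiK
        have hx2 : ¬ (l.drop pos)[i] = '[' := by simpa using hx
        apply hx2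
        rw [List.getElem_drop]
        exact hgv
      have hsing := pv_tokens_singles l (l.length - pos) pos (by omega) hno
      rw [hsing, pv_tokens_nil l l.length (pos + (l.length - pos)) (by omega)]
      have htk : List.take (l.length - pos) (l.drop pos) = l.drop pos := by
        apply List.take_of_length_le
        rw [List.length_drop]
      rw [htk]
      simp only [pv_join_nil_flatten, List.map_append, List.map_map, List.flatten_append,
        List.flatten_cons, List.flatten_nil, List.append_nil, List.append_assoc, List.map_nil]
      rw [show (pvTransform ∘ fun c => [c]) = pvFoldChar from funext fun c => pv_transform_eq_foldChar c]

-- ===== VERDICT (by name: the statement is the Claim_ definition above) =====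
theorem make_case_insensitive_py_spec : Claim_equal_make_case_insensitive_py := by
  intro pattern _
  unfold Spec_make_case_insensitive_py make_case_insensitive_py make_case_insensitive_py_alt
  rw [pv_main pattern.toList pattern.toList.length 0 [] (by omega)]
  have hB := pv_mainB pattern.toList (pattern.toList.length + 1) 0 [] (by omega) (by omega)
  rw [List.drop_zero] at hB
  rw [hB]
  rw [pv_join_nil_flatten]
  simp
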